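-- pv_equiv track=rewrite | github.com/shealutton/ProjectEuler | ProjectEuler-060/ProjectEuler-060-2.py | prime_combinations
-- ===== SOURCE A (Python) =====
-- import itertools
--
-- def prime_combinations(primes):
--     GOAL = 5
--     p_subset = set()
--     for prime in primes:
--         if 2 < prime < 2000:
--             p_subset.add(prime)
--
--     for item in itertools.combinations(sorted(p_subset), GOAL):
--         yield item
-- ===== SOURCE B (Python) =====
-- def prime_combinations(primes):
--     # sort the filtered values (with duplicates), dedupe adjacent ones in one pass
--     xs = sorted(p for p in primes if 2 < p < 2000)
--     lst = []
--     prev = None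
--     for x in xs:
--         if x != prev:
--             lst.append(x)
--             prev = x
--
--     # k-combinations by include/exclude recursion on the head
--     def choose(xs, k):
--         if k == 0:
--             yield ()
--         elif len(xs) < k:
--             return
--         else:
--             first, rest = xs[0], xs[1:]
--             for tail in choose(rest, k - 1):
--                 yield (first,) + tail
--             yield from choose(rest, k)
--
--     yield from choose(lst, 5)
-- ===== Notes on version B (the rewrite author's own statement) =====
-- stated objective: alternative
-- what changed: B dedupes by sorting the filtered list with duplicates and removing adjacent equals in one pass (no hash set), and generates the 5-combinations by binary include/exclude recursion on the head of the list instead of calling itertools.combinations.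
import Mathlib
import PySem

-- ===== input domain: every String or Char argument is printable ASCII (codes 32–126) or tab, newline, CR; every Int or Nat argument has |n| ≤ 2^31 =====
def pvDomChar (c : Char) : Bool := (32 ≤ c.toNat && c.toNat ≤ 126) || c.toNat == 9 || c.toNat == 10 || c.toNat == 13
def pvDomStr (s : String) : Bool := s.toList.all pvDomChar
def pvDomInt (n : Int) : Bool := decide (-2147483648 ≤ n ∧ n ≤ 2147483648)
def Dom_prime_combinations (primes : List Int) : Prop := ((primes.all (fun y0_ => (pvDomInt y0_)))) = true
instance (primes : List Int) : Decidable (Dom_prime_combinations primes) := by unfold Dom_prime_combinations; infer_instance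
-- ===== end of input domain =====

-- B dedupes by sort-then-adjacent-scan instead of a hash set, and builds the 5-combinations by
-- include/exclude recursion instead of itertools.combinations (objective: alternative, same cost).
-- A is a generator; equivalence is about the sequence of yielded 5-tuples, as a list.

-- ===== PORT A =====
-- set() built by 'for prime in primes: if 2 < prime < 2000: p_subset.add(prime)',
-- then itertools.combinations(sorted(p_subset), 5) (= PySem.List.combinations, CPython's order).
def prime_combinations (primes : List Int) : List (List Int) :=
  let p_subset : PySem.Set Int :=
    primes.foldl (fun s prime => if 2 < prime ∧ prime < 2000 then PySem.Set.add s prime else s)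
      PySem.Set.empty
  PySem.List.combinations (PySem.List.sorted p_subset (fun x => x) false) 5

-- ===== PORT B =====
-- the one-pass adjacent-dedup loop over the sorted filtered list, state (lst, prev)
def pvDedupLoop (xs : List Int) : List Int :=
  (xs.foldl (fun s x => if some x = s.2 then s else (s.1 ++ [x], some x))
    (([] : List Int), (none : Option Int))).1

-- 'choose(xs, k)': k = 0 yields (); len(xs) < k yields nothing; else head-included tuples first,
-- then head-excluded ones.
def pvChoose : List Int → Nat → List (List Int)
  | _, 0 => [[]]
  | [], _ + 1 => []
  | x :: rest, k + 1 =>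
      if (x :: rest).length < k + 1 then []
      else (pvChoose rest k).map (x :: ·) ++ pvChoose rest (k + 1)

def prime_combinations_alt (primes : List Int) : List (List Int) :=
  let xs := PySem.List.sorted (primes.filter (fun p => decide (2 < p ∧ p < 2000))) (fun x => x) false
  pvChoose (pvDedupLoop xs) 5

-- ===== PRECONDITION & SPEC =====
def Spec_prime_combinations (primes : List Int) (out : List (List Int)) : Prop := out = prime_combinations_alt primes
instance (primes : List Int) (out : List (List Int)) : Decidable (Spec_prime_combinations primes out) := by unfold Spec_prime_combinations; infer_instance

-- ===== CLAIM (what is proved, stated in full; the proofs are below) =====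
def Claim_equal_prime_combinations : Prop := ∀ (primes : List Int), Dom_prime_combinations primes → Spec_prime_combinations primes (prime_combinations primes)

-- ===== LEMMAS AND PROOFS =====

-- A's guarded-add fold over primes builds exactly set(filtered primes).
theorem pv_fold_add_eq_ofList_filter (primes : List Int) (s : PySem.Set Int) :
    primes.foldl (fun s prime => if 2 < prime ∧ prime < 2000 then PySem.Set.add s prime else s) s
      = (primes.filter (fun p => decide (2 < p ∧ p < 2000))).foldl PySem.Set.add s := by
  induction primes generalizing s with
  | nil => rfl
  | cons x xs ih =>
    by_cases h : 2 < x ∧ x < 2000 <;> simp [List.foldl, List.filter, h, ih]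

-- recursive form of the dedup loop, for reasoning
def pvDgo : Option Int → List Int → List Int
  | _, [] => []
  | p, x :: t => if some x = p then pvDgo p t else x :: pvDgo (some x) t

theorem pvDedupLoop_eq_dgo_aux (xs : List Int) (acc : List Int) (p : Option Int) :
    (xs.foldl (fun s x => if some x = s.2 then s else (s.1 ++ [x], some x)) (acc, p)).1
      = acc ++ pvDgo p xs := by
  induction xs generalizing acc p with
  | nil => simp [pvDgo]
  | cons x t ih =>
    by_cases h : some x = p <;> simp [List.foldl, pvDgo, h, ih]

theorem pvDedupLoop_eq_dgo (xs : List Int) : pvDedupLoop xs = pvDgo none xs := by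
  simpa using pvDedupLoop_eq_dgo_aux xs [] none

-- on a ≤-sorted tail whose elements are all ≥ p, dedup-from-prev-p is strictly increasing,
-- keeps exactly the elements ≠ p, and all its elements are > p
theorem pvDgo_some (xs : List Int) : ∀ (p : Int), xs.Pairwise (· ≤ ·) → (∀ a ∈ xs, p ≤ a) →
    (pvDgo (some p) xs).Pairwise (· < ·)
    ∧ (∀ a, a ∈ pvDgo (some p) xs ↔ a ∈ xs ∧ a ≠ p)
    ∧ (∀ a ∈ pvDgo (some p) xs, p < a) := by
  induction xs with
  | nil => intro p _ _; simp [pvDgo]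
  | cons x t ih =>
    intro p hs hp
    have hpt : ∀ a ∈ t, p ≤ a := fun a ha => hp a (List.mem_cons_of_mem _ ha)
    by_cases h : x = p
    · have hstep : pvDgo (some p) (x :: t) = pvDgo (some p) t := by simp [pvDgo, h]
      have hrec := ih p hs.of_cons hpt
      rw [hstep]
      refine ⟨hrec.1, ?_, hrec.2.2⟩
      intro a
      rw [hrec.2.1 a]
      constructor
      · rintro ⟨ha, hne⟩; exact ⟨List.mem_cons_of_mem _ ha, hne⟩
      · rintro ⟨ha, hne⟩
        rcases List.mem_cons.1 ha with rfl | ha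
        · exact absurd h hne
        · exact ⟨ha, hne⟩
    · have hpx : p < x := lt_of_le_of_ne (hp x (List.mem_cons_self)) (fun e => h e.symm)
      have hxt : ∀ a ∈ t, x ≤ a := fun a ha => (List.pairwise_cons.1 hs).1 a ha
      have hrec := ih x hs.of_cons hxt
      have hstep : pvDgo (some p) (x :: t) = x :: pvDgo (some x) t := by
        simp [pvDgo, h]
      rw [hstep]
      refine ⟨List.pairwise_cons.2 ⟨hrec.2.2, hrec.1⟩, ?_, ?_⟩
      · intro a
        simp only [List.mem_cons, hrec.2.1 a]
        constructor
        · rintro (rfl | ⟨ha, hne⟩)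
          · exact ⟨Or.inl rfl, fun e => h e⟩
          · refine ⟨Or.inr ha, fun e => ?_⟩
            have hxa := hxt a ha
            omega
        · rintro ⟨rfl | ha, hne⟩
          · exact Or.inl rfl
          · by_cases hax : a = x
            · exact Or.inl hax
            · exact Or.inr ⟨ha, hax⟩
      · intro a ha
        rcases List.mem_cons.1 ha with rfl | ha
        · exact hpx
        · exact hpx.trans (hrec.2.2 a ha)

theorem pvDgo_none (xs : List Int) (hs : xs.Pairwise (· ≤ ·)) :
    (pvDgo none xs).Pairwise (· < ·) ∧ (∀ a, a ∈ pvDgo none xs ↔ a ∈ xs) := by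
  cases xs with
  | nil => simp [pvDgo]
  | cons x t =>
    have hxt : ∀ a ∈ t, x ≤ a := fun a ha => (List.pairwise_cons.1 hs).1 a ha
    have hrec := pvDgo_some t x hs.of_cons hxt
    have hstep : pvDgo none (x :: t) = x :: pvDgo (some x) t := by simp [pvDgo]
    constructor
    · rw [hstep]; exact List.pairwise_cons.2 ⟨hrec.2.2, hrec.1⟩
    · intro a
      rw [hstep]
      simp only [List.mem_cons, hrec.2.1 a]
      constructor
      · rintro (rfl | ⟨ha, _⟩)
        · exact Or.inl rfl
        · exact Or.inr ha
      · rintro (rfl | ha)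
        · exact Or.inl rfl
        · by_cases hax : a = x
          · exact Or.inl hax
          · exact Or.inr ⟨ha, hax⟩

-- the dedup of the sorted filtered list IS sorted(set(filtered))
theorem pv_dedup_sorted_eq (f : List Int) :
    PySem.List.sorted (PySem.Set.ofList f) (fun x => x) false
      = pvDgo none (PySem.List.sorted f (fun x => x) false) := by
  set s := PySem.List.sorted f (fun x => x) false with hs
  have hpw : s.Pairwise (· ≤ ·) := by
    simpa using PySem.List.sorted_pairwise f (fun x => x)
  obtain ⟨hlt, hmem⟩ := pvDgo_none s hpw
  apply PySem.List.sorted_eq_of_perm_of_pairwise_lt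
  · refine (List.perm_ext_iff_of_nodup (hlt.imp (fun h => ne_of_lt h)) ?_).2 ?_
    · exact PySem.Set.nodup_ofList f
    · intro a
      rw [hmem a, hs, PySem.List.mem_sorted, PySem.Set.mem_ofList]
  · simpa using hlt

-- include/exclude recursion computes itertools.combinations
theorem pvChoose_eq_combinations (xs : List Int) : ∀ (k : Nat),
    pvChoose xs k = PySem.List.combinations xs k := by
  induction xs with
  | nil =>
    intro k
    cases k with
    | zero => simp [pvChoose, PySem.List.combinations_zero]
    | succ k => simp [pvChoose, PySem.List.combinations_nil_succ]
  | cons x t ih =>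
    intro k
    cases k with
    | zero => simp [pvChoose, PySem.List.combinations_zero]
    | succ k =>
      show (if (x :: t).length < k + 1 then []
          else (pvChoose t k).map (x :: ·) ++ pvChoose t (k + 1))
        = PySem.List.combinations (x :: t) (k + 1)
      by_cases h : (x :: t).length < k + 1
      · rw [if_pos h]
        exact (PySem.List.combinations_eq_nil_of_length_lt _ h).symm
      · rw [if_neg h, PySem.List.combinations_cons_succ, ih k, ih (k + 1)]

-- ===== VERDICT (by name: the statement is the Claim_ definition above) =====
theorem prime_combinations_spec : Claim_equal_prime_combinations := by
  intro primes _
  show PySem.List.combinations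
      (PySem.List.sorted
        (primes.foldl
          (fun s prime => if 2 < prime ∧ prime < 2000 then PySem.Set.add s prime else s)
          PySem.Set.empty)
        (fun x => x) false) 5
    = pvChoose
        (pvDedupLoop
          (PySem.List.sorted (primes.filter (fun p => decide (2 < p ∧ p < 2000)))
            (fun x => x) false)) 5
  rw [pv_fold_add_eq_ofList_filter, show PySem.Set.empty = ([] : List Int) from rfl,
    ← PySem.Set.ofList_eq_foldl, pvDedupLoop_eq_dgo, pvChoose_eq_combinations,
    pv_dedup_sorted_eq]
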